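-- pv_equiv track=rewrite | github.com/aitrail001/words-v2 | tools/lexicon/review_prep.py | summarize_review_prep_rows
-- ===== SOURCE A (Python) =====
-- from typing import Any, Iterable
--
-- def summarize_review_prep_rows(rows: Iterable[dict[str, Any]]) -> dict[str, int]:
--     summary = {"total": 0, "pass": 0, "fail": 0, "warning": 0}
--     for row in rows:
--         summary["total"] += 1
--         verdict = str(row.get("verdict") or "").strip().lower()
--         if verdict in {"pass", "fail"}:
--             summary[verdict] += 1
--         if row.get("warning_labels"):
--             summary["warning"] += 1
--     return summary
-- ===== SOURCE B (Python) =====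
-- def summarize_review_prep_rows(rows):
--     rows = list(rows)
--
--     def verdict(r):
--         return str(r.get("verdict") or "").strip().lower()
--
--     return {
--         "total": len(rows),
--         "pass": sum(1 for r in rows if verdict(r) == "pass"),
--         "fail": sum(1 for r in rows if verdict(r) == "fail"),
--         "warning": sum(1 for r in rows if r.get("warning_labels")),
--     }
-- ===== Notes on version B (the rewrite author's own statement) =====
-- stated objective: alternative
-- what changed: Replaced the single fused loop that mutates one summary dict with a materialize-then-multi-pass decomposition: total = len(rows) plus three independent one-condition scans, assembled into the dict at the end.
import Mathlib
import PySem

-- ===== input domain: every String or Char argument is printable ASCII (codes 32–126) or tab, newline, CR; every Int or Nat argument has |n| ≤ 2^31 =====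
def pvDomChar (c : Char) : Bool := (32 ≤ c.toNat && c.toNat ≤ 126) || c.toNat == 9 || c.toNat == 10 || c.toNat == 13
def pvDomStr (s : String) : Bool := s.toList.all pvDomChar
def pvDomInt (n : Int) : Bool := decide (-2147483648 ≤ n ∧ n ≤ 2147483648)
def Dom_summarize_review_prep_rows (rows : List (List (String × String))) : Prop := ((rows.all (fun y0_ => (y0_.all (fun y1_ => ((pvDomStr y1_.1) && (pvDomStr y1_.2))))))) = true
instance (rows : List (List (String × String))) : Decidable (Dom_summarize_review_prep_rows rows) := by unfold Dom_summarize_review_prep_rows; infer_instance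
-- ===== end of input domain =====

-- B replaces A's single fused dict-mutating loop with len(rows) plus three independent one-condition scans (alternative decomposition, same cost).

-- shared helper: str(row.get("verdict") or "").strip().lower()  (both Pythons contain this exact expression)
def pvRowVerdict (row : List (String × String)) : String :=
  PySem.Str.lower (PySem.Str.strip (((PySem.Dict.mk row).get? "verdict").getD ""))

-- shared helper: truthiness of row.get("warning_labels") (a string on this domain: truthy iff present and non-empty)
def pvRowWarn (row : List (String × String)) : Bool :=
  ((PySem.Dict.mk row).get? "warning_labels").getD "" != ""

-- ===== PORT A =====
-- A's loop body: one iteration of 'for row in rows'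
def pvStepA (summary : PySem.Dict String Int) (row : List (String × String)) : PySem.Dict String Int :=
  let summary := summary.modify "total" 0 (· + 1)
  let verdict := pvRowVerdict row
  let summary := if verdict = "pass" ∨ verdict = "fail"
    then summary.modify verdict 0 (· + 1) else summary
  if pvRowWarn row then summary.modify "warning" 0 (· + 1) else summary

def summarize_review_prep_rows (rows : List (List (String × String))) : List (String × Int) :=
  (rows.foldl pvStepA
    (PySem.Dict.mk [("total", 0), ("pass", 0), ("fail", 0), ("warning", 0)])).items

-- ===== PORT B =====
def summarize_review_prep_rows_alt (rows : List (List (String × String))) : List (String × Int) :=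
  [("total", (rows.length : Int)),
   ("pass", (rows.map (fun r => if pvRowVerdict r = "pass" then (1 : Int) else 0)).sum),
   ("fail", (rows.map (fun r => if pvRowVerdict r = "fail" then (1 : Int) else 0)).sum),
   ("warning", (rows.map (fun r => if pvRowWarn r then (1 : Int) else 0)).sum)]

-- ===== PRECONDITION & SPEC =====
def Spec_summarize_review_prep_rows (rows : List (List (String × String))) (out : List (String × Int)) : Prop := out = summarize_review_prep_rows_alt rows
instance (rows : List (List (String × String))) (out : List (String × Int)) : Decidable (Spec_summarize_review_prep_rows rows out) := by unfold Spec_summarize_review_prep_rows; infer_instance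

-- ===== CLAIM (what is proved, stated in full; the proofs are below) =====
def Claim_equal_summarize_review_prep_rows : Prop := ∀ (rows : List (List (String × String))), Dom_summarize_review_prep_rows rows → Spec_summarize_review_prep_rows rows (summarize_review_prep_rows rows)

-- ===== LEMMAS AND PROOFS =====

-- one iteration of A's loop on the literal summary shape
lemma pv_stepA_mk (t p f w : Int) (r : List (String × String)) :
    pvStepA (PySem.Dict.mk [("total", t), ("pass", p), ("fail", f), ("warning", w)]) r
    = PySem.Dict.mk
        [("total", t + 1),
         ("pass", p + (if pvRowVerdict r = "pass" then (1 : Int) else 0)),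
         ("fail", f + (if pvRowVerdict r = "fail" then (1 : Int) else 0)),
         ("warning", w + (if pvRowWarn r then (1 : Int) else 0))] := by
  by_cases h1 : pvRowVerdict r = "pass" <;>
    by_cases h2 : pvRowVerdict r = "fail" <;>
      by_cases h3 : pvRowWarn r = true
  all_goals first
    | (rw [h1] at h2; exact absurd h2 (by decide))
    | (simp only [pvStepA, h1, h2, h3]
       simp [PySem.Dict.modify, PySem.Dict.contains, PySem.Dict.getD, PySem.Dict.get?,
          PySem.Dict.insert])

-- loop invariant: folding A's step from any literal summary adds length and the three 0/1 sums
lemma pv_foldl_items (rows : List (List (String × String))) :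
    ∀ (t p f w : Int),
    (rows.foldl pvStepA (PySem.Dict.mk [("total", t), ("pass", p), ("fail", f), ("warning", w)])).items
    = [("total", t + rows.length),
       ("pass", p + (rows.map (fun r => if pvRowVerdict r = "pass" then (1 : Int) else 0)).sum),
       ("fail", f + (rows.map (fun r => if pvRowVerdict r = "fail" then (1 : Int) else 0)).sum),
       ("warning", w + (rows.map (fun r => if pvRowWarn r then (1 : Int) else 0)).sum)] := by
  induction rows with
  | nil => intro t p f w; simp
  | cons r rs ih =>
      intro t p f w
      rw [List.foldl_cons, pv_stepA_mk, ih]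
      simp only [List.map_cons, List.sum_cons, List.length_cons]
      push_cast
      ring_nf

-- ===== VERDICT (by name: the statement is the Claim_ definition above) =====
theorem summarize_review_prep_rows_spec : Claim_equal_summarize_review_prep_rows := by
  intro rows _
  unfold Spec_summarize_review_prep_rows summarize_review_prep_rows summarize_review_prep_rows_alt
  rw [pv_foldl_items rows 0 0 0 0]
  norm_num
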